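-- pv_equiv track=rewrite | github.com/dansuarr/prueba_tecnica_boolea | problema_3.py | funcion_personalizada
-- ===== SOURCE A (Python) =====
-- def suma_digitos(n: int) -> int:
--     return sum(int(i) for i in str(n))
--
-- def funcion_personalizada(n: int) -> str:
--     if n <= 100:
--         raise ValueError('El número debe ser mayor que 100.')
--
--     suma = suma_digitos(n)
--     while suma > 9:
--         suma = suma_digitos(suma)
--
--     resultado = str(suma) + str(n)
--
--     return resultado
-- ===== SOURCE B (Python) =====
-- def funcion_personalizada(n: int) -> str:
--     if n <= 100:
--         raise ValueError('El número debe ser mayor que 100.')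
--     raiz = 1 + (n - 1) % 9
--     return str(raiz) + str(n)
-- ===== Notes on version B (the rewrite author's own statement) =====
-- stated objective: idiomatic
-- what changed: Replaced the helper-based repeated digit-summing loop (string-convert and sum digits until one digit remains) with the closed-form digital root 1+(n-1)%9; no loop and no helper.
import Mathlib
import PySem

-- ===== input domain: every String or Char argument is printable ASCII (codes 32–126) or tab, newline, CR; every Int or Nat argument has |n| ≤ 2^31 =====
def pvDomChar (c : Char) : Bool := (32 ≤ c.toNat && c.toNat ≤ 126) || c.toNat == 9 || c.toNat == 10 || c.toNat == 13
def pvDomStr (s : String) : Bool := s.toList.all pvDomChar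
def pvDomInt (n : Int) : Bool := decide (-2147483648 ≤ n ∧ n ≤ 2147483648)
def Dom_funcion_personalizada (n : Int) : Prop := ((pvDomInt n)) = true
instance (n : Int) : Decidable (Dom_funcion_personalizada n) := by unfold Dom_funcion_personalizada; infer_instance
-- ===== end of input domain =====

-- B replaces A's repeated digit-summing loop by the closed-form digital root 1 + (n-1) % 9 (idiomatic, loop-free).

-- ===== PORT A =====
-- int(i) for a single character i; Python raises ValueError on a non-digit, but inside
-- Pre_ every character fed to it is a decimal digit, so the default 0 is never used.
def pvDigitVal (c : Char) : Int := (PySem.Int.ofChars? [c]).getD 0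

-- sum(int(i) for i in str(n))
def suma_digitos (n : Int) : Int := ((PySem.Int.toChars n).map pvDigitVal).sum

-- The following four lemmas exist only to justify the termination of the while-loop
-- `lazoSuma` below (cited by name in its decreasing_by); they characterise suma_digitos.
theorem pvDigitVal_digitChar (r : Nat) (h : r < 10) : pvDigitVal (Nat.digitChar r) = (r : Int) := by
  interval_cases r <;> decide

theorem pv_core_sum (f : Nat) : ∀ (m : Nat) (ds : List Char), m < f →
    ((Nat.toDigitsCore 10 f m ds).map pvDigitVal).sum
      = ((Nat.digits 10 m).sum : Int) + (ds.map pvDigitVal).sum := by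
  induction f with
  | zero => intro m ds h; omega
  | succ f ih =>
    intro m ds h
    rw [Nat.toDigitsCore]
    by_cases h0 : m / 10 = 0
    · have hm : m < 10 := by omega
      have hmm : m % 10 = m := Nat.mod_eq_of_lt hm
      simp only [h0, hmm, if_true, List.map_cons, List.sum_cons]
      rw [pvDigitVal_digitChar m hm]
      rcases Nat.eq_zero_or_pos m with rfl | hpos
      · simp
      · rw [Nat.digits_def' (by norm_num : 1 < 10) hpos, h0]
        simp [Nat.mod_eq_of_lt hm]
    · have hpos : 0 < m := by omega
      have hlt : m / 10 < f := by
        have := Nat.div_lt_self hpos (by norm_num : 1 < 10)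
        omega
      simp only [if_neg h0]
      rw [ih (m / 10) _ hlt, Nat.digits_def' (by norm_num : 1 < 10) hpos]
      simp only [List.map_cons, List.sum_cons]
      rw [pvDigitVal_digitChar (m % 10) (Nat.mod_lt m (by norm_num))]
      push_cast
      ring

theorem pv_suma_eq (n : Int) (h : 0 ≤ n) :
    suma_digitos n = ((Nat.digits 10 n.toNat).sum : Int) := by
  unfold suma_digitos PySem.Int.toChars
  rw [if_neg (by omega), Nat.toDigits]
  rw [pv_core_sum _ _ _ (Nat.lt_succ_self _)]
  simp

theorem pv_digitsum_lt (m : Nat) (h : 10 ≤ m) : (Nat.digits 10 m).sum < m := by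
  rw [Nat.digits_def' (by norm_num : 1 < 10) (by omega)]
  have h1 := Nat.digit_sum_le 10 (m / 10)
  have h2 : 0 < m / 10 := Nat.div_pos h (by norm_num)
  have h3 : m % 10 + 10 * (m / 10) = m := Nat.mod_add_div m 10
  simp only [List.sum_cons]
  omega

theorem pv_lazo_dec (s : Int) (h : 9 < s) : (suma_digitos s).toNat < s.toNat := by
  rw [pv_suma_eq s (by omega)]
  have := pv_digitsum_lt s.toNat (by omega)
  omega

-- while suma > 9: suma = suma_digitos(suma)
def lazoSuma (s : Int) : Int :=
  if h : 9 < s then lazoSuma (suma_digitos s) else s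
termination_by s.toNat
decreasing_by exact pv_lazo_dec s h

def funcion_personalizada (n : Int) : String :=
  if n ≤ 100 then ""  -- Python raises ValueError here; excluded by Pre_
  else PySem.Int.toStr (lazoSuma (suma_digitos n)) ++ PySem.Int.toStr n

-- ===== PORT B =====
def funcion_personalizada_alt (n : Int) : String :=
  if n ≤ 100 then ""  -- Python raises ValueError here; excluded by Pre_
  else PySem.Int.toStr (1 + PySem.Int.mod (n - 1) 9) ++ PySem.Int.toStr n

-- ===== PRECONDITION & SPEC =====
-- A raises ValueError exactly when n ≤ 100.
def Pre_funcion_personalizada (n : Int) : Prop := 100 < n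
instance (n : Int) : Decidable (Pre_funcion_personalizada n) := by unfold Pre_funcion_personalizada; infer_instance
def pvWitness_funcion_personalizada : Int := (101)

def Spec_funcion_personalizada (n : Int) (out : String) : Prop := out = funcion_personalizada_alt n
instance (n : Int) (out : String) : Decidable (Spec_funcion_personalizada n out) := by unfold Spec_funcion_personalizada; infer_instance

-- ===== CLAIM (what is proved, stated in full; the proofs are below) =====
def Claim_equal_funcion_personalizada : Prop := ∀ (n : Int), Dom_funcion_personalizada n → Pre_funcion_personalizada n → Spec_funcion_personalizada n (funcion_personalizada n)

-- ===== LEMMAS AND PROOFS =====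

theorem pv_digitsum_pos (m : Nat) (h : 0 < m) : 0 < (Nat.digits 10 m).sum := by
  induction m using Nat.strong_induction_on with
  | _ m ih =>
    rw [Nat.digits_def' (by norm_num : 1 < 10) h]
    simp only [List.sum_cons]
    rcases Nat.eq_zero_or_pos (m % 10) with h0 | h0
    · have h2 : 0 < m / 10 := by
        rcases Nat.eq_zero_or_pos (m / 10) with h3 | h3
        · omega
        · exact h3
      have := ih (m / 10) (Nat.div_lt_self h (by norm_num)) h2
      omega
    · omega

theorem pv_digitsum_mod9 (m : Nat) : ((Nat.digits 10 m).sum : Int) % 9 = (m : Int) % 9 := by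
  have := (Nat.modEq_nine_digits_sum m).symm
  have h2 : ((Nat.digits 10 m).sum : Int) ≡ (m : Int) [ZMOD 9] := Int.natCast_modEq_iff.mpr this
  exact h2

-- the loop computes the digital root: for 1 ≤ s, lazoSuma s = 1 + (s-1) % 9
theorem pv_lazo_root (k : Nat) : ∀ (s : Int), s.toNat = k → 1 ≤ s → lazoSuma s = 1 + (s - 1) % 9 := by
  induction k using Nat.strong_induction_on with
  | _ k ih =>
    intro s hk hs
    rw [lazoSuma]
    by_cases h9 : 9 < s
    · have h0 : 0 ≤ s := by omega
      have hlt := pv_lazo_dec s h9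
      have hsum : suma_digitos s = ((Nat.digits 10 s.toNat).sum : Int) := pv_suma_eq s h0
      have hpos : 1 ≤ suma_digitos s := by
        rw [hsum]
        exact_mod_cast pv_digitsum_pos s.toNat (by omega)
      rw [dif_pos h9, ih (suma_digitos s).toNat (by omega) _ rfl hpos]
      have hm9 : suma_digitos s % 9 = s % 9 := by
        rw [hsum, pv_digitsum_mod9]
        congr 1
        omega
      have : (suma_digitos s - 1) % 9 = (s - 1) % 9 := by
        have h1 := Int.emod_emod_of_dvd (suma_digitos s - 1) (dvd_refl 9)
        omega
      rw [this]
    · rw [dif_neg h9]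
      have : (s - 1) % 9 = s - 1 := Int.emod_eq_of_lt (by omega) (by omega)
      omega

theorem pv_main (n : Int) (h : 100 < n) :
    lazoSuma (suma_digitos n) = 1 + PySem.Int.mod (n - 1) 9 := by
  have h0 : 0 ≤ n := by omega
  have hsum : suma_digitos n = ((Nat.digits 10 n.toNat).sum : Int) := pv_suma_eq n h0
  have hpos : 1 ≤ suma_digitos n := by
    rw [hsum]
    exact_mod_cast pv_digitsum_pos n.toNat (by omega)
  rw [pv_lazo_root (suma_digitos n).toNat (suma_digitos n) rfl hpos]
  rw [PySem.Int.mod_eq_emod_of_pos (by norm_num)]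
  have hm9 : suma_digitos n % 9 = n % 9 := by
    rw [hsum, pv_digitsum_mod9]
    congr 1
    omega
  have h1 := Int.emod_emod_of_dvd (suma_digitos n - 1) (dvd_refl 9)
  omega

-- ===== VERDICT (by name: the statement is the Claim_ definition above) =====
theorem funcion_personalizada_spec : Claim_equal_funcion_personalizada := by
  intro n _ hpre
  unfold Spec_funcion_personalizada funcion_personalizada funcion_personalizada_alt
  have h : ¬ n ≤ 100 := by exact not_le.mpr hpre
  rw [if_neg h, if_neg h, pv_main n hpre]
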